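-- pv_equiv track=rewrite | github.com/1HotSauce1/ML-Project---Misogyny-Tweets | convert_text.py | corpus_to_bow
-- ===== SOURCE A (Python) =====
-- def corpus_to_bow(tokens, corpus):
--     corpus = dict(corpus)
--     bow = [dict.fromkeys(corpus, 0) for i in range(0, len(tokens))]
--
--     for i in range(0, len(tokens)):
--         for j in tokens[i]:
--             if j in bow[i]:
--                 bow[i][j] += 1
--     return bow
-- ===== SOURCE B (Python) =====
-- def corpus_to_bow(tokens, corpus):
--     keys = list(dict(corpus))
--     return [{k: row.count(k) for k in keys} for row in tokens]
-- ===== Notes on version B (the rewrite author's own statement) =====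
-- stated objective: simpler
-- what changed: B is key-major: for each row it builds the dict directly by scanning the row once per corpus key with list.count, maintaining no counting dict at all, whereas A is token-major, mutating a pre-built zero dict with a guarded increment per token.
import Mathlib
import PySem

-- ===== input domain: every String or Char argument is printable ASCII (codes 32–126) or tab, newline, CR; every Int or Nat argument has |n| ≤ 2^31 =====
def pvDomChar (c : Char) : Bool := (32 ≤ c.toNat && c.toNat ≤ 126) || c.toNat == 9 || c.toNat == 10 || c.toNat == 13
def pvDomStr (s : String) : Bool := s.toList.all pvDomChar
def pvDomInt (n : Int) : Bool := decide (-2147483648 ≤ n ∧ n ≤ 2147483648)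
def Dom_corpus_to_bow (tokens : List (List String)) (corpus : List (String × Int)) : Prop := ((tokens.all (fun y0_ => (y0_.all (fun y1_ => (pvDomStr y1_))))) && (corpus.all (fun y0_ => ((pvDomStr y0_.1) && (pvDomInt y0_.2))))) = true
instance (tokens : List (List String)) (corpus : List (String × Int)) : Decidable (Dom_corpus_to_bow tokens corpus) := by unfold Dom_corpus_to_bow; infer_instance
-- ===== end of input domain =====

-- B builds each row's dict key-major with list.count per corpus key (no counting dict at
-- all), instead of A's token-major guarded-increment mutation of a zero-initialised dict;
-- objective: simpler.

-- ===== PORT A =====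
-- bow[i] starts as dict.fromkeys(corpus, 0); each token that is a key gets incremented.
def corpus_to_bow (tokens : List (List String)) (corpus : List (String × Int)) : List (List (String × Int)) :=
  let cd := PySem.Dict.ofList corpus
  let init : PySem.Dict String Int :=
    cd.keys.foldl (fun d k => d.insert k 0) PySem.Dict.empty   -- dict.fromkeys(corpus, 0)
  (tokens.map (fun row =>
    (row.foldl (fun d j => if d.contains j then d.modify j 0 (· + 1) else d) init).items))

-- ===== PORT B =====
-- keys = list(dict(corpus)); [{k: row.count(k) for k in keys} for row in tokens]
def corpus_to_bow_alt (tokens : List (List String)) (corpus : List (String × Int)) : List (List (String × Int)) :=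
  let keys := (PySem.Dict.ofList corpus).keys
  tokens.map (fun row => keys.map (fun k => (k, PySem.List.count row k)))

-- ===== PRECONDITION & SPEC =====
def Spec_corpus_to_bow (tokens : List (List String)) (corpus : List (String × Int)) (out : List (List (String × Int))) : Prop := out = corpus_to_bow_alt tokens corpus
instance (tokens : List (List String)) (corpus : List (String × Int)) (out : List (List (String × Int))) : Decidable (Spec_corpus_to_bow tokens corpus out) := by unfold Spec_corpus_to_bow; infer_instance

-- ===== CLAIM (what is proved, stated in full; the proofs are below) =====
def Claim_equal_corpus_to_bow : Prop := ∀ (tokens : List (List String)) (corpus : List (String × Int)), Dom_corpus_to_bow tokens corpus → Spec_corpus_to_bow tokens corpus (corpus_to_bow tokens corpus)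

-- ===== LEMMAS AND PROOFS =====

-- dict.fromkeys(_, 0): every lookup with default 0 is 0.
theorem fromkeys_getD (l : List String) (d : PySem.Dict String Int) (x : String)
    (h : d.getD x 0 = 0) :
    (l.foldl (fun d k => d.insert k 0) d).getD x 0 = 0 := by
  induction l generalizing d with
  | nil => exact h
  | cons a l ih =>
      simp only [List.foldl_cons]
      exact ih _ (by rw [PySem.Dict.getD_insert]; split_ifs <;> simp [h])

-- A's guarded increment loop never changes the key list.
theorem countFold_keys (l : List String) (d : PySem.Dict String Int) :
    (l.foldl (fun d j => if d.contains j then d.modify j 0 (· + 1) else d) d).keys = d.keys := by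
  induction l generalizing d with
  | nil => rfl
  | cons a l ih =>
      simp only [List.foldl_cons]
      by_cases h : d.contains a = true
      · rw [if_pos h, ih]
        exact PySem.Dict.keys_insert_of_contains _ _ h
      · rw [if_neg h, ih]

-- A's guarded increment loop adds the token count at any key already present.
theorem countFold_getD (l : List String) (d : PySem.Dict String Int) (k : String)
    (hk : d.contains k = true) :
    (l.foldl (fun d j => if d.contains j then d.modify j 0 (· + 1) else d) d).getD k 0
      = d.getD k 0 + l.count k := by
  induction l generalizing d with
  | nil => simp
  | cons a l ih =>
      simp only [List.foldl_cons]
      by_cases h : d.contains a = true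
      · rw [if_pos h]
        have hk' : (d.modify a 0 (· + 1)).contains k = true := by
          rw [PySem.Dict.contains_modify]; simp [hk]
        rw [ih _ hk']
        have hg : (d.modify a 0 (· + 1)).getD k 0 = if k = a then d.getD a 0 + 1 else d.getD k 0 :=
          PySem.Dict.getD_modify _ _ _ _ _
        rw [hg, List.count_cons]
        by_cases hak : k = a
        · subst hak
          simp
          omega
        · have hka : a ≠ k := fun e => hak e.symm
          simp [hak, hka]
      · rw [if_neg h, ih _ hk, List.count_cons]
        have hak : a ≠ k := by intro e; subst e; exact h hk
        simp [hak]

-- ===== VERDICT (by name: the statement is the Claim_ definition above) =====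
theorem corpus_to_bow_spec : Claim_equal_corpus_to_bow := by
  intro tokens corpus _
  unfold Spec_corpus_to_bow corpus_to_bow corpus_to_bow_alt
  apply List.map_congr_left
  intro row _
  set keys := (PySem.Dict.ofList corpus).keys with hkeys
  have hnd : keys.Nodup := PySem.Dict.nodup_keys_ofList corpus
  set init : PySem.Dict String Int := keys.foldl (fun d k => d.insert k 0) PySem.Dict.empty with hinit
  have hik : init.keys = keys := by
    rw [hinit, PySem.Dict.keys_foldl_insert, PySem.Dict.keys_empty,
      PySem.Set.update_nil_left]
    exact PySem.Set.ofList_eq_self_of_nodup _ hnd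
  set res := row.foldl (fun d j => if d.contains j then d.modify j 0 (· + 1) else d) init with hres
  have hrk : res.keys = keys := by rw [hres, countFold_keys, hik]
  have : res.items = res.keys.map (fun k => (k, res.getD k 0)) :=
    PySem.Dict.items_eq_map_keys res (by rw [hrk]; exact hnd) 0
  rw [this, hrk]
  apply List.map_congr_left
  intro k hkmem
  have hck : init.contains k = true :=
    (PySem.Dict.contains_iff_mem_keys _ _).mpr (by rw [hik]; exact hkmem)
  have h1 : res.getD k 0 = row.count k := by
    rw [hres, countFold_getD _ _ _ hck, hinit,
      fromkeys_getD _ _ _ (PySem.Dict.getD_empty _ _)]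
    omega
  rw [h1, PySem.List.count_eq]
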